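-- pv_equiv track=rewrite | github.com/alis-khadka/llm_program_grader | dataset/solutions/21_22-2-1-python/OUNQV2P3.py | calc
-- ===== SOURCE A (Python) =====
-- def calc(A,B):
--     nums = [0]*4*10**6
--     for i in range(len(A)):
--         nums[A[i]] += 1
--     ans = []
--     for i in range(len(B)):
--         if nums[i] <= B[i]:
--             ans.append('1')
--         else:
--             ans.append('0')
--     return "".join(ans)
-- ===== SOURCE B (Python) =====
-- def calc(A, B):
--     rest = sorted(A, reverse=True)
--     out = []
--     for i in range(len(B)):
--         while rest and rest[-1] < i:
--             rest.pop()
--         c = 0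
--         while rest and rest[-1] == i:
--             c += 1
--             rest.pop()
--         out.append('1' if c <= B[i] else '0')
--     return "".join(out)
-- ===== Notes on version B (the rewrite author's own statement) =====
-- stated objective: alternative
-- what changed: B replaces the 4,000,000-entry counting table and its two staged passes with a sort-then-merge scan: it sorts A once (descending, used as a stack) and walks it in step with the indices 0..len(B)-1, popping each run of equal values off the end to obtain its multiplicity, so no table is ever built.
-- outside the precondition, e.g. on calc([-3999999], [0, 0]): A returns '10', B returns '11'
-- crash fix: On inputs with an element of A outside [-4*10^6, 4*10^6) or with len(B) > 4*10^6, A raises IndexError while B returns the comparison string computed from actual counts. — e.g. on calc([4000000], []): A raises IndexError, B returns ""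
import Mathlib
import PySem

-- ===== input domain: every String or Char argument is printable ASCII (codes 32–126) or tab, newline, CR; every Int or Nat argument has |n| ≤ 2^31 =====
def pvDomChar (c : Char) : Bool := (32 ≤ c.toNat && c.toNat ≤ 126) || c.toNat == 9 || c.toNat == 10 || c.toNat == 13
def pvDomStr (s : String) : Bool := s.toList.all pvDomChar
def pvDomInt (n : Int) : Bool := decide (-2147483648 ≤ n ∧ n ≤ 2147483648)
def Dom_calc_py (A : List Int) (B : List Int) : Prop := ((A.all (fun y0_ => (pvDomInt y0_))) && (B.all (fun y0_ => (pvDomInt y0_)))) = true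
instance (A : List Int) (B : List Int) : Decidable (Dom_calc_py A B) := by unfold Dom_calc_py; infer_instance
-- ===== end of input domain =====

-- B replaces A's 4,000,000-entry counting table with a sort-then-merge scan of A against the indices of B (objective: alternative).

-- ===== PORT A =====
def calc_py (A : List Int) (B : List Int) : String :=
  let nums : List Int := PySem.List.pyRepeat (PySem.List.pyRepeat [(0:Int)] 4) ((10:Int)^6)
  let nums := (PySem.List.pyRange 0 (PySem.List.len A)).foldl
    (fun ns i =>
      PySem.List.pySetD ns (PySem.List.pyGetD A i 0)
        (PySem.List.pyGetD ns (PySem.List.pyGetD A i 0) 0 + 1)) nums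
  let ans := (PySem.List.pyRange 0 (PySem.List.len B)).foldl
    (fun acc i =>
      if PySem.List.pyGetD nums i 0 ≤ PySem.List.pyGetD B i 0 then acc ++ ["1"]
      else acc ++ ["0"]) ([] : List String)
  PySem.Str.join "" ans

-- ===== PORT B =====
-- 'while rest and rest[-1] < i: rest.pop()'  (rest[-1] is the last element; pop() removes it)
def pvPopLt (i : Int) (l : List Int) : List Int :=
  if h : ((l.getLast?.map (fun x => decide (x < i))).getD false) then pvPopLt i l.dropLast else l
termination_by l.length
decreasing_by
  cases l with
  | nil => simp at h
  | cons a as => simp [List.length_dropLast]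

-- 'c = 0; while rest and rest[-1] == i: c += 1; rest.pop()'  (returns final c and remaining rest)
def pvPopEq (i : Int) (c : Nat) (l : List Int) : Nat × List Int :=
  if h : ((l.getLast?.map (fun x => decide (x = i))).getD false) then pvPopEq i (c + 1) l.dropLast
  else (c, l)
termination_by l.length
decreasing_by
  cases l with
  | nil => simp at h
  | cons a as => simp [List.length_dropLast]

def calc_py_alt (A : List Int) (B : List Int) : String :=
  let step : (List Int × List String) → Int → (List Int × List String) := fun st i =>
    let rest := pvPopLt i st.1
    let p := pvPopEq i 0 rest
    (p.2, st.2 ++ [if (p.1 : Int) ≤ PySem.List.pyGetD B i 0 then "1" else "0"])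
  let fin := (PySem.List.pyRange 0 (PySem.List.len B)).foldl step
    (PySem.List.sorted A (fun x => x) true, ([] : List String))
  PySem.Str.join "" fin.2

-- ===== PRECONDITION & SPEC =====
-- Pre_ excludes inputs where A raises IndexError (an element of A outside [-4*10^6, 4*10^6), or
-- len(B) > 4*10^6) and the negative elements of A whose Python negative-index wraparound lands the
-- tally inside the compared prefix range(len(B)) — an artefact of A's table indexing; negative
-- elements whose wrapped slot 4*10^6+a lies beyond len(B) are kept and proved equal.
def Pre_calc_py (A : List Int) (B : List Int) : Prop :=
  (∀ a ∈ A, -4000000 ≤ a ∧ a < 4000000 ∧ (a < 0 → (B.length : Int) ≤ 4000000 + a)) ∧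
    B.length ≤ 4000000
instance (A : List Int) (B : List Int) : Decidable (Pre_calc_py A B) := by unfold Pre_calc_py; infer_instance

def pvWitness_calc_py : List Int × List Int := ([1, 1, 0], [1, 2, 0])

-- On inputs with an element of A outside [-4*10^6, 4*10^6) or with len(B) > 4*10^6, A raises
-- IndexError while B returns the comparison string computed from actual counts.
def Raises_calc_py (A : List Int) (B : List Int) : Prop :=
  (∃ a ∈ A, a < -4000000 ∨ 4000000 ≤ a) ∨ 4000000 < B.length
instance (A : List Int) (B : List Int) : Decidable (Raises_calc_py A B) := by unfold Raises_calc_py; infer_instance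
def pvRaiseWitness_calc_py : List Int × List Int := ([4000000], [])
def pvRaiseWitnessOut_calc_py : String := ""

def Spec_calc_py (A : List Int) (B : List Int) (out : String) : Prop := out = calc_py_alt A B
instance (A : List Int) (B : List Int) (out : String) : Decidable (Spec_calc_py A B out) := by unfold Spec_calc_py; infer_instance

-- ===== CLAIM (what is proved, stated in full; the proofs are below) =====
def Claim_equal_calc_py : Prop := ∀ (A : List Int) (B : List Int), Dom_calc_py A B → Pre_calc_py A B → Spec_calc_py A B (calc_py A B)
def Claim_raises_calc_py : Prop := (∀ (A : List Int) (B : List Int), Dom_calc_py A B → Raises_calc_py A B → ¬ Pre_calc_py A B) ∧ (Dom_calc_py (pvRaiseWitness_calc_py.1) (pvRaiseWitness_calc_py.2) ∧ Raises_calc_py (pvRaiseWitness_calc_py.1) (pvRaiseWitness_calc_py.2) ∧ calc_py_alt (pvRaiseWitness_calc_py.1) (pvRaiseWitness_calc_py.2) = pvRaiseWitnessOut_calc_py)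

-- ===== LEMMAS AND PROOFS =====

-- [0]*4*10**6 is 4,000,000 zeros
lemma pyRepeat_repl : PySem.List.pyRepeat (PySem.List.pyRepeat [(0:Int)] 4) ((10:Int)^6)
    = List.replicate 4000000 (0:Int) := by
  rw [PySem.List.pyRepeat_singleton]
  unfold PySem.List.pyRepeat
  norm_num [List.flatten_replicate_replicate]
  decide

-- Python negative-index write: ns[a] = v for -len ≤ a < 0 sets slot len + a
lemma pySetD_neg (ns : List Int) (a : Int) (v : Int) (h1 : -(ns.length:Int) ≤ a) (h2 : a < 0) :
    PySem.List.pySetD ns a v = ns.set ((ns.length:Int) + a).toNat v := by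
  simp only [PySem.List.pySetD, PySem.List.pySet?, PySem.List.pyIdx?,
    if_neg (by omega : ¬ (0:Int) ≤ a), if_pos h1, Option.map_some, Option.getD_some]
  congr 1
  omega

-- table invariant: after folding A's bump step over ns, every slot i < L holds ns[i] + (count of i
-- in A); wrapped writes from negative elements stay at slots ≥ L and do not disturb it
lemma table_get (L : Int) (hL : L ≤ 4000000) (A ns : List Int) (i : Int)
    (hns : ns.length = 4000000)
    (hA : ∀ a ∈ A, -4000000 ≤ a ∧ a < 4000000 ∧ (a < 0 → L ≤ 4000000 + a))
    (h0 : 0 ≤ i) (h1 : i < L) :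
    PySem.List.pyGetD
      (A.foldl (fun ns a => PySem.List.pySetD ns a (PySem.List.pyGetD ns a 0 + 1)) ns) i 0
      = PySem.List.pyGetD ns i 0 + (A.count i : Int) := by
  induction A generalizing ns with
  | nil => simp
  | cons a A ih =>
    obtain ⟨ha1, ha2, ha3⟩ := hA a (by simp)
    have hlen : (PySem.List.pySetD ns a (PySem.List.pyGetD ns a 0 + 1)).length = ns.length :=
      PySem.List.length_pySetD ns a _
    rw [List.foldl_cons, ih _ (by rw [hlen]; exact hns) (fun x hx => hA x (by simp [hx]))]
    by_cases hneg : a < 0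
    · -- benign wraparound: the touched slot (4*10^6 + a) lies at or beyond L > i
      rw [pySetD_neg ns a _ (by omega) hneg]
      have hidx : ((ns.length:Int) + a).toNat ≠ i.toNat := by omega
      have hgi : PySem.List.pyGetD (ns.set ((ns.length:Int) + a).toNat (PySem.List.pyGetD ns a 0 + 1)) i 0
          = PySem.List.pyGetD ns i 0 := by
        rw [PySem.List.pyGetD_eq_getElem _ _ h0 (by simp only [List.length_set]; omega),
            PySem.List.pyGetD_eq_getElem _ _ h0 (by omega)]
        rw [List.getElem_set]
        simp [hidx]
      rw [hgi]
      have hcnt : (a :: A).count i = A.count i := by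
        rw [List.count_cons, if_neg (by simp; omega)]; omega
      rw [hcnt]
    · have hset : PySem.List.pyGetD (PySem.List.pySetD ns a (PySem.List.pyGetD ns a 0 + 1)) i 0
          = if i = a then PySem.List.pyGetD ns a 0 + 1 else PySem.List.pyGetD ns i 0 := by
        have := PySem.List.pyGetD_pySetD_natCast ns a.toNat i.toNat (PySem.List.pyGetD ns a 0 + 1) 0 (by omega)
        simpa [Int.toNat_of_nonneg (by omega : (0:Int) ≤ a), Int.toNat_of_nonneg h0,
          (by omega : i.toNat = a.toNat ↔ i = a)] using this
      rw [hset]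
      have hc : (a :: A).count i = A.count i + if a = i then 1 else 0 := by
        simp [List.count_cons]
      rw [hc]
      by_cases h : i = a
      · simp [h]; ring
      · simp [h, Ne.symm h]

-- A's answer-building loop appends one one-character string per index: it is a map
lemma loop2_map (l : List Int) (c : Int → Prop) [DecidablePred c] (acc : List String) :
    l.foldl (fun acc i => if c i then acc ++ ["1"] else acc ++ ["0"]) acc
      = acc ++ l.map (fun i => if c i then "1" else "0") := by
  induction l generalizing acc with
  | nil => simp
  | cons x l ih => by_cases h : c x <;> simp [h, ih]

-- ascending-order models of the two pop loops (pvPopLt/pvPopEq act on the reversed list)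
def pvDropLt (i : Int) : List Int → List Int
  | [] => []
  | x :: xs => if x < i then pvDropLt i xs else x :: xs

def pvCountEq (i : Int) : Nat → List Int → Nat × List Int
  | c, [] => (c, [])
  | c, x :: xs => if x = i then pvCountEq i (c + 1) xs else (c, x :: xs)

-- popping from the back of the reversed list is dropping from the front
lemma pvPopLt_rev (i : Int) (m : List Int) :
    pvPopLt i m.reverse = (pvDropLt i m).reverse := by
  induction m with
  | nil => rw [pvPopLt]; simp [pvDropLt]
  | cons x xs ih =>
    rw [List.reverse_cons, pvPopLt]
    by_cases h : x < i <;>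
      simp [h, ih, pvDropLt]

lemma pvPopEq_rev (i : Int) (c : Nat) (m : List Int) :
    pvPopEq i c m.reverse = ((pvCountEq i c m).1, (pvCountEq i c m).2.reverse) := by
  induction m generalizing c with
  | nil => rw [pvPopEq]; simp [pvCountEq]
  | cons x xs ih =>
    rw [List.reverse_cons, pvPopEq]
    by_cases h : x = i <;>
      simp [h, ih, pvCountEq]

-- sorted(A, reverse=True) is the reverse of sorted(A) (identity key on Int)
lemma sorted_rev_eq_reverse (A : List Int) :
    PySem.List.sorted A (fun x => x) true = (PySem.List.sorted A (fun x => x) false).reverse := by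
  have h1 : ((PySem.List.sorted A (fun x => x) true).reverse).Pairwise (· ≤ ·) := by
    rw [List.pairwise_reverse]
    simpa using PySem.List.sorted_pairwise_rev A (fun x => x)
  have h2 : ((PySem.List.sorted A (fun x => x) false)).Pairwise (· ≤ ·) := by
    simpa using PySem.List.sorted_pairwise A (fun x => x)
  have hperm : ((PySem.List.sorted A (fun x => x) true).reverse).Perm
      (PySem.List.sorted A (fun x => x) false) :=
    (List.reverse_perm _).trans
      ((PySem.List.sorted_perm A (fun x => x) true).trans
        (PySem.List.sorted_perm A (fun x => x) false).symm)
  have := PySem.List.eq_of_perm_of_pairwise_le_of_injective (fun x : Int => x)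
    (fun a b h => h) hperm h1 h2
  rw [← this, List.reverse_reverse]

-- the backwards scan over the reversed list computes the same output as the forwards scan
lemma fold_rev (B : List Int) (l : List Int) :
    ∀ (m : List Int) (out : List String),
      ((l.foldl (fun (st : List Int × List String) i =>
          let rest := pvPopLt i st.1
          let p := pvPopEq i 0 rest
          (p.2, st.2 ++ [if (p.1 : Int) ≤ PySem.List.pyGetD B i 0 then "1" else "0"]))
        (m.reverse, out)).2)
      = ((l.foldl (fun (st : List Int × List String) i =>
          let rest := pvDropLt i st.1
          let p := pvCountEq i 0 rest
          (p.2, st.2 ++ [if (p.1 : Int) ≤ PySem.List.pyGetD B i 0 then "1" else "0"]))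
        (m, out)).2) := by
  induction l with
  | nil => intro m out; rfl
  | cons i l ih =>
    intro m out
    simp only [List.foldl_cons, pvPopLt_rev, pvPopEq_rev]
    exact ih (pvCountEq i 0 (pvDropLt i m)).2 _

-- the first while loop is dropWhile (· < i)
lemma pvDropLt_eq (i : Int) (l : List Int) :
    pvDropLt i l = l.dropWhile (fun x => decide (x < i)) := by
  induction l with
  | nil => rfl
  | cons x xs ih => by_cases h : x < i <;> simp [pvDropLt, List.dropWhile, h, ih]

-- the second while loop counts and drops the leading run of i's
lemma pvCountEq_eq (i : Int) (c : Nat) (l : List Int) :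
    pvCountEq i c l
      = (c + (l.takeWhile (fun x => decide (x = i))).length,
         l.dropWhile (fun x => decide (x = i))) := by
  induction l generalizing c with
  | nil => simp [pvCountEq]
  | cons x xs ih =>
    by_cases h : x = i
    · simp [pvCountEq, List.takeWhile, List.dropWhile, h, ih]
      omega
    · simp [pvCountEq, List.takeWhile, List.dropWhile, h]

-- on a sorted list, dropping the values < i and taking the run of i's yields the count of i
lemma run_count (i : Int) (l : List Int) (hs : l.Pairwise (· ≤ ·)) :
    ((l.dropWhile (fun x => decide (x < i))).takeWhile (fun x => decide (x = i))).length
      = l.count i := by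
  induction l with
  | nil => rfl
  | cons x xs ih =>
    rw [List.pairwise_cons] at hs
    by_cases h : x < i
    · rw [List.dropWhile_cons_of_pos (by simpa using h), ih hs.2, List.count_cons,
        if_neg (by simp; omega)]
      omega
    · rw [List.dropWhile_cons_of_neg (by simpa using h)]
      by_cases he : x = i
      · have hxs : xs.dropWhile (fun x => decide (x < i)) = xs := by
          cases xs with
          | nil => rfl
          | cons y ys =>
            exact List.dropWhile_cons_of_neg (by
              have := hs.1 y (by simp); simp; omega)
        rw [List.takeWhile_cons_of_pos (by simpa using he), List.count_cons, if_pos (by simp [he])]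
        rw [hxs] at ih
        simp [ih hs.2]

      · rw [List.takeWhile_cons_of_neg (by simpa using he)]
        have : i ∉ x :: xs := by
          intro hm
          rcases List.mem_cons.mp hm with h1 | h1
          · exact he h1.symm
          · have := hs.1 i h1; omega
        simp [List.count_eq_zero.mpr this]

-- every element the two while loops removed is < i + 1
lemma run_rest (i : Int) (l : List Int) :
    ∃ q, l = q ++ ((l.dropWhile (fun x => decide (x < i))).dropWhile (fun x => decide (x = i)))
      ∧ ∀ x ∈ q, x < i + 1 := by
  refine ⟨l.takeWhile (fun x => decide (x < i))
      ++ (l.dropWhile (fun x => decide (x < i))).takeWhile (fun x => decide (x = i)), ?_, ?_⟩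
  · rw [List.append_assoc, List.takeWhile_append_dropWhile, List.takeWhile_append_dropWhile]
  · intro x hx
    rcases List.mem_append.mp hx with h | h
    · have := List.mem_takeWhile_imp h; simp at this; omega
    · have := List.mem_takeWhile_imp h; simp at this; omega

-- the merge scan over range(a, a+n) emits the per-index count comparisons of the sorted list S
lemma scan_inv (B S : List Int) (hs : S.Pairwise (· ≤ ·)) (n : Nat) :
    ∀ (a : Nat) (rest : List Int) (out : List String),
      (∃ q, S = q ++ rest ∧ ∀ x ∈ q, x < (a : Int)) →
      ((PySem.List.pyRange (a : Int) ((a : Int) + (n : Int))).foldl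
        (fun st i =>
          let rest := pvDropLt i st.1
          let p := pvCountEq i 0 rest
          (p.2, st.2 ++ [if (p.1 : Int) ≤ PySem.List.pyGetD B i 0 then "1" else "0"]))
        (rest, out)).2
      = out ++ (PySem.List.pyRange (a : Int) ((a : Int) + (n : Int))).map
          (fun i => if (S.count i : Int) ≤ PySem.List.pyGetD B i 0 then "1" else "0") := by
  induction n with
  | zero =>
    intro a rest out _
    simp
  | succ n ih =>
    intro a rest out hq
    obtain ⟨q, hSq, hql⟩ := hq
    have hcons : PySem.List.pyRange (a : Int) ((a : Int) + ((n : Int) + 1))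
        = (a : Int) :: PySem.List.pyRange ((a : Int) + 1) (((a : Int) + 1) + (n : Int)) := by
      rw [show ((a : Int) + 1) + (n : Int) = (a : Int) + ((n : Int) + 1) by ring,
        PySem.List.pyRange_one_cons (show (a : Int) < (a : Int) + ((n : Int) + 1) by omega)]
    have hrests : rest.Pairwise (· ≤ ·) := by
      have hsl : rest.Sublist S := hSq ▸ List.sublist_append_right q rest
      exact List.Pairwise.sublist hsl hs
    have hcount : rest.count (a : Int) = S.count (a : Int) := by
      have hcq : q.count (a : Int) = 0 :=
        List.count_eq_zero.mpr (fun hm => by have := hql _ hm; omega)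
      rw [hSq, List.count_append, hcq, Nat.zero_add]
    rw [show (((n + 1 : Nat)) : Int) = (n : Int) + 1 by push_cast; ring,
      hcons, List.foldl_cons, List.map_cons]
    have hih := ih (a + 1)
      ((rest.dropWhile (fun x => decide (x < (a:Int)))).dropWhile (fun x => decide (x = (a:Int))))
      (out ++ [if (S.count (a:Int) : Int) ≤ PySem.List.pyGetD B (a:Int) 0 then "1" else "0"])
      (by
        obtain ⟨q', hq', hql'⟩ := run_rest (a : Int) rest
        refine ⟨q ++ q', ?_, fun x hx => by
          rcases List.mem_append.mp hx with h | h
          · have := hql x h; push_cast; omega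
          · have := hql' x h; push_cast; omega⟩
        rw [hSq, List.append_assoc, ← hq'])
    push_cast at hih ⊢
    simp only [pvDropLt_eq, pvCountEq_eq, Nat.zero_add] at hih ⊢
    rw [run_count _ _ hrests, hcount, hih, List.append_assoc]
    simp

-- ===== VERDICT (by name: the statement is the Claim_ definition above) =====
theorem calc_py_spec : Claim_equal_calc_py := by
  intro A B _ hPre
  unfold Spec_calc_py
  obtain ⟨hA, hB⟩ := hPre
  unfold calc_py calc_py_alt
  simp only [PySem.List.len, pyRepeat_repl]
  rw [PySem.List.foldl_pyRange_zero_pyGetD' A 0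
      (fun ns x => PySem.List.pySetD ns x (PySem.List.pyGetD ns x 0 + 1))
      (List.replicate 4000000 (0:Int))]
  rw [loop2_map]
  rw [sorted_rev_eq_reverse, fold_rev]
  have hscan := scan_inv B (PySem.List.sorted A (fun x => x) false)
    (by simpa using PySem.List.sorted_pairwise A (fun x => x)) B.length 0
    (PySem.List.sorted A (fun x => x) false) []
    ⟨[], by simp, by simp⟩
  simp only [Nat.cast_zero, zero_add, List.nil_append] at hscan ⊢
  rw [hscan]
  congr 1
  apply List.map_congr_left
  intro i hi
  rw [PySem.List.mem_pyRange_one] at hi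
  have hiB : i < (B.length : Int) := hi.2
  rw [table_get (B.length : Int) (by omega) A _ i (by simp only [List.length_replicate])
      hA hi.1 hiB]
  have hz : PySem.List.pyGetD (List.replicate 4000000 (0:Int)) i 0 = 0 := by
    rw [PySem.List.pyGetD_eq_getElem _ _ hi.1 (by simp only [List.length_replicate]; omega)]
    simp only [List.getElem_replicate]
  rw [hz, zero_add]
  rw [List.Perm.count_eq (PySem.List.sorted_perm A (fun x => x) false)]

def calc_py_raises : Claim_raises_calc_py := by
  unfold Claim_raises_calc_py
  refine ⟨?_, by decide⟩
  rintro A B _ (⟨a, ha, h⟩ | h) ⟨h1, h2⟩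
  · rcases h1 a ha with ⟨hl, hr, _⟩; omega
  · omega
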